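-- pv_equiv track=rewrite | github.com/corinacc555/AA | lab 2/sorting_visualizer.py | quick_sort_generator
-- ===== SOURCE A (Python) =====
-- from typing import List, Tuple, Generator
--
-- def quick_sort_generator(arr: List[int], low: int = 0, high: int = None) -> Generator:
--     """Generator for quick sort animation."""
--     if high is None:
--         high = len(arr) - 1
--
--     def partition(arr, low, high):
--         pivot = arr[high]
--         i = low - 1
--
--         for j in range(low, high):
--             # Highlight comparison with pivot
--             colors = ['blue'] * len(arr)
--             colors[high] = 'yellow'  # pivot
--             colors[j] = 'red'
--             if i >= 0:
--                 colors[i] = 'green'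
--             yield arr.copy(), colors
--
--             if arr[j] <= pivot:
--                 i += 1
--                 arr[i], arr[j] = arr[j], arr[i]
--
--                 # Show swap
--                 colors = ['blue'] * len(arr)
--                 colors[high] = 'yellow'
--                 colors[i] = 'green'
--                 colors[j] = 'green'
--                 yield arr.copy(), colors
--
--         arr[i + 1], arr[high] = arr[high], arr[i + 1]
--
--         # Show pivot placement
--         colors = ['blue'] * len(arr)
--         colors[i + 1] = 'green'
--         yield arr.copy(), colors
--
--         return i + 1
--
--     def quick_sort_helper(arr, low, high):
--         if low < high:
--             # Partition
--             pi_gen = partition(arr, low, high)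
--             for state in pi_gen:
--                 yield state
--
--             pi = low
--             temp_pivot = arr[high]
--             for k in range(low, high):
--                 if arr[k] <= temp_pivot:
--                     pi += 1
--
--             # Actually do the partition for recursion
--             pivot = arr[high]
--             i = low - 1
--             for j in range(low, high):
--                 if arr[j] <= pivot:
--                     i += 1
--                     arr[i], arr[j] = arr[j], arr[i]
--             arr[i + 1], arr[high] = arr[high], arr[i + 1]
--             pi = i + 1
--
--             # Recurse left
--             yield from quick_sort_helper(arr, low, pi - 1)
--             # Recurse right
--             yield from quick_sort_helper(arr, pi + 1, high)
--
--     yield from quick_sort_helper(arr, low, high)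
--
--     # Final state
--     colors = ['green'] * len(arr)
--     yield arr.copy(), colors
-- ===== SOURCE B (Python) =====
-- from typing import List, Generator
--
-- def quick_sort_generator(arr: List[int], low: int = 0, high: int = None) -> Generator:
--     """Iterative quicksort animation: explicit LIFO stack of ranges instead of
--     recursion; each color frame is built by one comprehension instead of
--     mutating a 'blue' list. Mutates arr in place, like the original."""
--     if high is None:
--         high = len(arr) - 1
--
--     def partition_frames(lo, hi):
--         n = len(arr)
--         frames = []
--         pivot = arr[hi]
--         i = lo - 1
--         for j in range(lo, hi):
--             frames.append((arr.copy(),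
--                 ['green' if k == i and i >= 0 else
--                  'red' if k == j else
--                  'yellow' if k == hi else 'blue' for k in range(n)]))
--             if arr[j] <= pivot:
--                 i += 1
--                 arr[i], arr[j] = arr[j], arr[i]
--                 frames.append((arr.copy(),
--                     ['yellow' if k == hi else
--                      'green' if k == i or k == j else 'blue' for k in range(n)]))
--         arr[i + 1], arr[hi] = arr[hi], arr[i + 1]
--         frames.append((arr.copy(),
--             ['green' if k == i + 1 else 'blue' for k in range(n)]))
--         return frames
--
--     def lomuto(lo, hi):
--         # the original performs a second, silent partition before recursing;
--         # arr must evolve the same way, so repeat it here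
--         pivot = arr[hi]
--         i = lo - 1
--         for j in range(lo, hi):
--             if arr[j] <= pivot:
--                 i += 1
--                 arr[i], arr[j] = arr[j], arr[i]
--         arr[i + 1], arr[hi] = arr[hi], arr[i + 1]
--         return i + 1
--
--     stack = [(low, high)]
--     while stack:
--         lo, hi = stack.pop()
--         if lo < hi:
--             yield from partition_frames(lo, hi)
--             pi = lomuto(lo, hi)
--             stack.append((pi + 1, hi))
--             stack.append((lo, pi - 1))
--     yield (arr.copy(), ['green'] * len(arr))
-- ===== Notes on version B (the rewrite author's own statement) =====
-- stated objective: alternative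
-- what changed: The recursive quick_sort_helper is replaced by an iterative while-loop over an explicit LIFO stack of (low, high) ranges (left subrange pushed last so it is processed first), and each color frame is built by a single list comprehension over range(n) instead of mutating a ['blue']*n list in place.
import Mathlib
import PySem

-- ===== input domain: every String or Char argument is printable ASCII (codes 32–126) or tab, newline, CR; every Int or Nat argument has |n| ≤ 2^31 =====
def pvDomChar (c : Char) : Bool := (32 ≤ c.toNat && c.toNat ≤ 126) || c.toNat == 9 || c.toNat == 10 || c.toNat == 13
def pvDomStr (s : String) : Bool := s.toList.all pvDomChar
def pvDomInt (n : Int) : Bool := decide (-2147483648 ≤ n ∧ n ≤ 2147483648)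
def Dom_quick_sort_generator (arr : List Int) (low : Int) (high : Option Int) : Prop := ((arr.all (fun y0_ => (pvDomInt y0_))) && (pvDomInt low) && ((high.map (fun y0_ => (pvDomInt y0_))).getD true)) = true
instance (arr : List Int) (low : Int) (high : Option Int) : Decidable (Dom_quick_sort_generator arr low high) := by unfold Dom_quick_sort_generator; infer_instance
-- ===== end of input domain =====

-- B replaces A's recursive quick_sort_helper by an explicit LIFO stack of ranges and
-- builds each color frame with one comprehension instead of mutating a 'blue' list
-- (objective: alternative). Both A and B mutate the caller's arr identically; the
-- equivalence proved is about the list of yielded states.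

-- Python's simultaneous swap arr[i], arr[j] = arr[j], arr[i] (shared by both Pythons)
def pvSwap (a : List Int) (i j : Nat) : List Int :=
  let x := a.getD i 0
  let y := a.getD j 0
  (a.set i y).set j x

-- the silent second partition (identical code in A's helper and in Source B's `lomuto`)
def pvLomuto (arr : List Int) (low high : Int) : List Int × Int :=
  let pivot := arr.getD high.toNat 0
  let s := (PySem.List.pyRange low high 1).foldl
    (fun (s : Int × List Int) j =>
      if s.2.getD j.toNat 0 ≤ pivot then (s.1 + 1, pvSwap s.2 (s.1 + 1).toNat j.toNat) else s)
    (low - 1, arr)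
  (pvSwap s.2 (s.1 + 1).toNat high.toNat, s.1 + 1)

-- ===== PORT A =====

-- loop body of A's yielding `partition` (colors built by mutating a 'blue' list)
def pvStepA (pivot hi : Int) (s : Int × List Int × List (List Int × List String)) (j : Int) :
    Int × List Int × List (List Int × List String) :=
  let i := s.1
  let a := s.2.1
  let colors := ((List.replicate a.length "blue").set hi.toNat "yellow").set j.toNat "red"
  let colors := if 0 ≤ i then colors.set i.toNat "green" else colors
  let fs := s.2.2 ++ [(a, colors)]
  if a.getD j.toNat 0 ≤ pivot then
    let i := i + 1
    let a := pvSwap a i.toNat j.toNat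
    let colors2 := (((List.replicate a.length "blue").set hi.toNat "yellow").set i.toNat "green").set j.toNat "green"
    (i, a, fs ++ [(a, colors2)])
  else (i, a, fs)

-- A's `partition` generator: (yielded frames, mutated arr)
def pvPartitionA (arr : List Int) (low high : Int) : List (List Int × List String) × List Int :=
  let pivot := arr.getD high.toNat 0
  let s := (PySem.List.pyRange low high 1).foldl (pvStepA pivot high) (low - 1, arr, [])
  let a := pvSwap s.2.1 (s.1 + 1).toNat high.toNat
  (s.2.2 ++ [(a, (List.replicate a.length "blue").set (s.1 + 1).toNat "green")], a)

-- A's recursive quick_sort_helper: (yielded frames, mutated arr).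
-- fuel is only a structural-termination guard: callers pass fuel > high - low, so the
-- fuel-exhausted arm is never reached (pv_bridge's induction never uses it).
def quickSortHelperA (fuel : Nat) (arr : List Int) (low high : Int) : List (List Int × List String) × List Int :=
  match fuel with
  | 0 => ([], arr)
  | f + 1 =>
    if low < high then
      let p := pvPartitionA arr low high
      -- A's dead pi-counting loop (its result is immediately overwritten by the real pi)
      let _pi_dead := (PySem.List.pyRange low high 1).foldl
        (fun pi k => if p.2.getD k.toNat 0 ≤ p.2.getD high.toNat 0 then pi + 1 else pi) low
      let L := quickSortHelperA f (pvLomuto p.2 low high).1 low ((pvLomuto p.2 low high).2 - 1)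
      let R := quickSortHelperA f L.2 ((pvLomuto p.2 low high).2 + 1) high
      (p.1 ++ L.1 ++ R.1, R.2)
    else ([], arr)

def quick_sort_generator (arr : List Int) (low : Int) (high : Option Int) : List (List Int × List String) :=
  let h := match high with
    | none => (arr.length : Int) - 1
    | some x => x
  let r := quickSortHelperA ((h - low).toNat + 1) arr low h
  r.1 ++ [(r.2, List.replicate r.2.length "green")]

-- ===== PORT B =====

-- loop body of Source B's `partition_frames` (each frame is one comprehension over range(n))
def pvStepB (pivot hi : Int) (n : Nat) (s : Int × List Int × List (List Int × List String)) (j : Int) :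
    Int × List Int × List (List Int × List String) :=
  let i := s.1
  let a := s.2.1
  let fs := s.2.2 ++ [(a, (List.range n).map (fun (k : Nat) =>
    if (k : Int) = i ∧ 0 ≤ i then "green"
    else if (k : Int) = j then "red"
    else if (k : Int) = hi then "yellow" else "blue"))]
  if a.getD j.toNat 0 ≤ pivot then
    let i := i + 1
    let a := pvSwap a i.toNat j.toNat
    (i, a, fs ++ [(a, (List.range n).map (fun (k : Nat) =>
      if (k : Int) = hi then "yellow"
      else if (k : Int) = i ∨ (k : Int) = j then "green" else "blue"))])
  else (i, a, fs)

-- Source B's `partition_frames`: (frames, mutated arr)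
def pvPartitionB (arr : List Int) (low high : Int) : List (List Int × List String) × List Int :=
  let n := arr.length
  let pivot := arr.getD high.toNat 0
  let s := (PySem.List.pyRange low high 1).foldl (pvStepB pivot high n) (low - 1, arr, [])
  let a := pvSwap s.2.1 (s.1 + 1).toNat high.toNat
  (s.2.2 ++ [(a, (List.range n).map (fun (k : Nat) => if (k : Int) = s.1 + 1 then "green" else "blue"))], a)

def pvStackMeasure (st : List (Int × Int)) : Nat :=
  (st.map (fun p => 3 ^ ((p.2 - p.1 + 1).toNat))).sum

-- Source B's while-loop over the explicit stack of ranges.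
-- fuel is only a structural-termination guard: the wrapper passes pvStackMeasure of the
-- initial stack, which pv_loop_fuel_congr/pv_bridge show is always sufficient.
def quickSortLoopB (fuel : Nat) (stack : List (Int × Int)) (arr : List Int) : List (List Int × List String) × List Int :=
  match stack, fuel with
  | [], _ => ([], arr)
  | _ :: _, 0 => ([], arr)
  | (l, h) :: rest, f + 1 =>
    if l < h then
      let r := quickSortLoopB f
        ((l, (pvLomuto (pvPartitionB arr l h).2 l h).2 - 1)
          :: ((pvLomuto (pvPartitionB arr l h).2 l h).2 + 1, h) :: rest)
        (pvLomuto (pvPartitionB arr l h).2 l h).1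
      ((pvPartitionB arr l h).1 ++ r.1, r.2)
    else quickSortLoopB f rest arr

def quick_sort_generator_alt (arr : List Int) (low : Int) (high : Option Int) : List (List Int × List String) :=
  let h := match high with
    | none => (arr.length : Int) - 1
    | some x => x
  let r := quickSortLoopB (pvStackMeasure [(low, h)]) [(low, h)] arr
  r.1 ++ [(r.2, List.replicate r.2.length "green")]

-- ===== PRECONDITION & SPEC =====
-- Pre_ excludes inputs whose active range (low < effective high) has a negative bound
-- (Python then wraps indices, coloring/swapping at wrapped positions — frames B does not
-- reproduce) or an effective high ≥ len(arr) (A raises IndexError there).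
def Pre_quick_sort_generator (arr : List Int) (low : Int) (high : Option Int) : Prop :=
  (low < (match high with | none => (arr.length : Int) - 1 | some x => x)) →
    (0 ≤ low ∧ (match high with | none => (arr.length : Int) - 1 | some x => x) < (arr.length : Int))
instance (arr : List Int) (low : Int) (high : Option Int) : Decidable (Pre_quick_sort_generator arr low high) := by unfold Pre_quick_sort_generator; infer_instance

def pvWitness_quick_sort_generator : List Int × Int × Option Int := ([3, 1, 2], 0, none)

def Spec_quick_sort_generator (arr : List Int) (low : Int) (high : Option Int) (out : List (List Int × List String)) : Prop := out = quick_sort_generator_alt arr low high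
instance (arr : List Int) (low : Int) (high : Option Int) (out : List (List Int × List String)) : Decidable (Spec_quick_sort_generator arr low high out) := by unfold Spec_quick_sort_generator; infer_instance

-- ===== CLAIM (what is proved, stated in full; the proofs are below) =====
def Claim_equal_quick_sort_generator : Prop := ∀ (arr : List Int) (low : Int) (high : Option Int), Dom_quick_sort_generator arr low high → Pre_quick_sort_generator arr low high → Spec_quick_sort_generator arr low high (quick_sort_generator arr low high)

-- ===== LEMMAS AND PROOFS =====

-- bound on pvLomuto's returned index, used to size the ranges pushed by both ports
theorem pvLomFold_fst_bounds (pivot : Int) (l : List Int) :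
    ∀ (s : Int × List Int),
      s.1 ≤ (l.foldl (fun (s : Int × List Int) j =>
          if s.2.getD j.toNat 0 ≤ pivot then (s.1 + 1, pvSwap s.2 (s.1 + 1).toNat j.toNat) else s) s).1 ∧
      (l.foldl (fun (s : Int × List Int) j =>
          if s.2.getD j.toNat 0 ≤ pivot then (s.1 + 1, pvSwap s.2 (s.1 + 1).toNat j.toNat) else s) s).1 ≤ s.1 + l.length := by
  induction l with
  | nil => intro s; simp
  | cons x xs ih =>
    intro s
    simp only [List.foldl_cons, List.length_cons]
    split_ifs with h
    · have := ih (s.1 + 1, pvSwap s.2 (s.1 + 1).toNat x.toNat)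
      constructor <;> [omega; (simp only at this; omega)]
    · have := ih s
      constructor <;> omega

theorem pvLomuto_snd_bounds (arr : List Int) (low high : Int) (h : low < high) :
    low ≤ (pvLomuto arr low high).2 ∧ (pvLomuto arr low high).2 ≤ high := by
  unfold pvLomuto
  have hb := pvLomFold_fst_bounds (arr.getD high.toNat 0) (PySem.List.pyRange low high 1) (low - 1, arr)
  have hl := PySem.List.length_pyRange_one low high
  simp only at hb ⊢
  omega


theorem pvSwap_length (a : List Int) (i j : Nat) : (pvSwap a i j).length = a.length := by
  simp [pvSwap]

-- setting a position in a map over range = pushing the update into the function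
theorem pv_set_map_range (n : Nat) (v : String) (f : Nat → String) (a : Nat) :
    ((List.range n).map f).set a v = (List.range n).map (fun k => if k = a then v else f k) := by
  apply List.ext_getElem
  · simp
  · intro i h1 h2
    simp only [List.getElem_set, List.getElem_map, List.getElem_range]
    split_ifs <;> first | rfl | omega

theorem pv_replicate_map (n : Nat) : List.replicate n "blue" = (List.range n).map (fun _ => "blue") := by
  simp [List.map_const']

-- the three frame shapes: A's set-chains equal B's comprehensions
theorem pv_frame1_eq (n : Nat) (i j hi : Int) (h0j : 0 ≤ j) (hij : i < j) (hjh : j < hi) :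
    (if 0 ≤ i then (((List.replicate n "blue").set hi.toNat "yellow").set j.toNat "red").set i.toNat "green"
     else ((List.replicate n "blue").set hi.toNat "yellow").set j.toNat "red")
    = (List.range n).map (fun (k : Nat) =>
        if (k : Int) = i ∧ 0 ≤ i then "green"
        else if (k : Int) = j then "red"
        else if (k : Int) = hi then "yellow" else "blue") := by
  rw [pv_replicate_map, pv_set_map_range, pv_set_map_range]
  split_ifs with h0i
  · rw [pv_set_map_range]
    apply List.map_congr_left
    intro k _
    split_ifs <;> first | rfl | omega
  · apply List.map_congr_left
    intro k _
    split_ifs <;> first | rfl | omega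

theorem pv_frame2_eq (n : Nat) (i j hi : Int) (h0i : 0 ≤ i) (hij : i ≤ j) (hjh : j < hi) :
    ((((List.replicate n "blue").set hi.toNat "yellow").set i.toNat "green").set j.toNat "green")
    = (List.range n).map (fun (k : Nat) =>
        if (k : Int) = hi then "yellow"
        else if (k : Int) = i ∨ (k : Int) = j then "green" else "blue") := by
  rw [pv_replicate_map, pv_set_map_range, pv_set_map_range, pv_set_map_range]
  apply List.map_congr_left
  intro k _
  split_ifs <;> first | rfl | omega

theorem pv_frame3_eq (n : Nat) (i : Int) (h0i : 0 ≤ i) :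
    ((List.replicate n "blue").set i.toNat "green")
    = (List.range n).map (fun (k : Nat) => if (k : Int) = i then "green" else "blue") := by
  rw [pv_replicate_map, pv_set_map_range]
  apply List.map_congr_left
  intro k _
  split_ifs <;> first | rfl | omega

-- one loop step of A's partition = one loop step of Source B's partition_frames
theorem pvStep_eq (pivot hi : Int) (n : Nat) (i j : Int) (a : List Int)
    (fs : List (List Int × List String)) (hlen : a.length = n)
    (h0j : 0 ≤ j) (hm1 : -1 ≤ i) (hij : i < j) (hjh : j < hi) :
    pvStepA pivot hi (i, a, fs) j = pvStepB pivot hi n (i, a, fs) j := by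
  simp only [pvStepA, pvStepB]
  rw [pvSwap_length, hlen, pv_frame1_eq n i j hi h0j hij hjh,
    pv_frame2_eq n (i + 1) j hi (by omega) (by omega) hjh]

theorem pvStepA_facts (pivot hi : Int) (s : Int × List Int × List (List Int × List String)) (j : Int) :
    ((pvStepA pivot hi s j).1 = s.1 ∨ (pvStepA pivot hi s j).1 = s.1 + 1) ∧
    (pvStepA pivot hi s j).2.1.length = s.2.1.length := by
  simp only [pvStepA]
  split_ifs <;> simp [pvSwap_length]

-- the two partition folds agree, keep i within [-1, next j), and preserve length
theorem pv_partFold_eq (pivot : Int) :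
    ∀ (N : Nat) (low high i : Int) (a : List Int) (fs : List (List Int × List String)) (n : Nat),
      (high - low).toNat ≤ N → 0 ≤ low → -1 ≤ i → i < low → a.length = n →
      (PySem.List.pyRange low high 1).foldl (pvStepA pivot high) (i, a, fs)
        = (PySem.List.pyRange low high 1).foldl (pvStepB pivot high n) (i, a, fs) ∧
      i ≤ ((PySem.List.pyRange low high 1).foldl (pvStepA pivot high) (i, a, fs)).1 ∧
      ((PySem.List.pyRange low high 1).foldl (pvStepA pivot high) (i, a, fs)).2.1.length = n := by
  intro N
  induction N with
  | zero =>
    intro low high i a fs n hN h0 hm1 hi hlen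
    have hnil : PySem.List.pyRange low high 1 = [] := by
      have := PySem.List.length_pyRange_one low high
      exact List.eq_nil_of_length_eq_zero (by omega)
    simp [hnil, hlen]
  | succ N ih =>
    intro low high i a fs n hN h0 hm1 hi hlen
    by_cases hlh : low < high
    · rw [PySem.List.pyRange_one_cons hlh]
      simp only [List.foldl_cons]
      rw [← pvStep_eq pivot high n i low a fs hlen (by omega) hm1 hi hlh]
      have hf := pvStepA_facts pivot high (i, a, fs) low
      rcases he : pvStepA pivot high (i, a, fs) low with ⟨i', a', fs'⟩
      rw [he] at hf
      simp only at hf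
      obtain ⟨hi', hlen'⟩ := hf
      obtain ⟨e1, e2, e3⟩ := ih (low + 1) high i' a' fs' n (by omega) (by omega)
        (by rcases hi' with h | h <;> omega) (by rcases hi' with h | h <;> omega)
        (by rw [hlen', hlen])
      refine ⟨e1, ?_, e3⟩
      rcases hi' with h | h <;> omega
    · have hnil : PySem.List.pyRange low high 1 = [] := by
        have := PySem.List.length_pyRange_one low high
        exact List.eq_nil_of_length_eq_zero (by omega)
      simp [hnil, hlen]

theorem pv_partition_eq (arr : List Int) (low high : Int) (h0 : 0 ≤ low) :
    pvPartitionA arr low high = pvPartitionB arr low high := by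
  simp only [pvPartitionA, pvPartitionB]
  obtain ⟨heq, hge, hlen⟩ := pv_partFold_eq (arr.getD high.toNat 0) (high - low).toNat low high
    (low - 1) arr [] arr.length (le_refl _) h0 (by omega) (by omega) rfl
  rw [← heq, pvSwap_length, hlen,
    pv_frame3_eq arr.length
      (((PySem.List.pyRange low high 1).foldl (pvStepA (arr.getD high.toNat 0) high) (low - 1, arr, [])).1 + 1)
      (by omega)]

-- measure facts for the stack loop
theorem pv_pow3_split (e1 e2 E : Nat) (h1 : e1 < E) (h2 : e2 < E) : 3 ^ e1 + 3 ^ e2 < 3 ^ E := by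
  have p1 : 3 ^ e1 ≤ 3 ^ (E - 1) := Nat.pow_le_pow_right (by norm_num) (by omega)
  have p2 : 3 ^ e2 ≤ 3 ^ (E - 1) := Nat.pow_le_pow_right (by norm_num) (by omega)
  have hE : 3 ^ E = 3 ^ (E - 1) * 3 := by
    rw [← pow_succ]
    congr 1
    omega
  have hpos : 0 < 3 ^ (E - 1) := pow_pos (by norm_num) (E - 1)
  omega

theorem pv_measure_pos (l h : Int) (rest : List (Int × Int)) :
    1 ≤ pvStackMeasure ((l, h) :: rest) := by
  simp only [pvStackMeasure, List.map_cons, List.sum_cons]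
  have := pow_pos (show (0:ℕ) < 3 by norm_num) ((h - l + 1).toNat)
  omega

theorem pv_measure_cons (l h : Int) (rest : List (Int × Int)) :
    pvStackMeasure ((l, h) :: rest) = 3 ^ ((h - l + 1).toNat) + pvStackMeasure rest := by
  simp [pvStackMeasure]

theorem pv_measure_step (l h pi : Int) (rest : List (Int × Int)) (hl : l < h)
    (hlo : l ≤ pi) (hhi : pi ≤ h) :
    pvStackMeasure ((l, pi - 1) :: (pi + 1, h) :: rest) < pvStackMeasure ((l, h) :: rest) := by
  simp only [pvStackMeasure, List.map_cons, List.sum_cons]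
  have := pv_pow3_split (pi - 1 - l + 1).toNat (h - (pi + 1) + 1).toNat (h - l + 1).toNat
    (by omega) (by omega)
  omega

theorem pv_loop_nil (g : Nat) (arr : List Int) : quickSortLoopB g [] arr = ([], arr) := by
  cases g <;> rfl

-- any two sufficient fuels give the same loop result
theorem pv_loop_fuel_congr :
    ∀ (g1 g2 : Nat) (stack : List (Int × Int)) (arr : List Int),
      pvStackMeasure stack ≤ g1 → pvStackMeasure stack ≤ g2 →
      quickSortLoopB g1 stack arr = quickSortLoopB g2 stack arr := by
  intro g1
  induction g1 with
  | zero =>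
    intro g2 stack arr h1 h2
    cases stack with
    | nil => rw [pv_loop_nil, pv_loop_nil]
    | cons p rest =>
      obtain ⟨l, h⟩ := p
      exact absurd h1 (by have := pv_measure_pos l h rest; omega)
  | succ a ih =>
    intro g2 stack arr h1 h2
    cases stack with
    | nil => rw [pv_loop_nil, pv_loop_nil]
    | cons p rest =>
      obtain ⟨l, h⟩ := p
      have hpos := pv_measure_pos l h rest
      have hsum := pv_measure_cons l h rest
      have hone : 1 ≤ 3 ^ ((h - l + 1).toNat) := Nat.one_le_pow _ _ (by norm_num)
      obtain ⟨b, rfl⟩ : ∃ b, g2 = b + 1 := ⟨g2 - 1, by omega⟩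
      rw [quickSortLoopB, quickSortLoopB]
      by_cases hl : l < h
      · simp only [hl, if_true]
        have hq := pvLomuto_snd_bounds (pvPartitionB arr l h).2 l h hl
        have hm := pv_measure_step l h (pvLomuto (pvPartitionB arr l h).2 l h).2 rest hl hq.1 hq.2
        rw [ih b _ _ (by omega) (by omega)]
      · simp only [hl, if_false]
        exact ih b rest arr (by omega) (by omega)

-- popping (l, h) off the stack = running A's recursive helper on (l, h), then the rest
theorem pv_bridge :
    ∀ (f : Nat) (g : Nat) (l h : Int) (arr : List Int) (rest : List (Int × Int)),
      (h - l).toNat < f → pvStackMeasure ((l, h) :: rest) ≤ g → (0 ≤ l ∨ h ≤ l) →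
      quickSortLoopB g ((l, h) :: rest) arr =
        ((quickSortHelperA f arr l h).1 ++
           (quickSortLoopB (pvStackMeasure rest) rest (quickSortHelperA f arr l h).2).1,
         (quickSortLoopB (pvStackMeasure rest) rest (quickSortHelperA f arr l h).2).2) := by
  intro f
  induction f with
  | zero =>
    intro g l h arr rest hf
    exact absurd hf (Nat.not_lt_zero _)
  | succ f ih =>
    intro g l h arr rest hf hg hc
    obtain ⟨g', rfl⟩ : ∃ g', g = g' + 1 := ⟨g - 1, by have := pv_measure_pos l h rest; omega⟩
    have hsum := pv_measure_cons l h rest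
    have hone : 1 ≤ 3 ^ ((h - l + 1).toNat) := Nat.one_le_pow _ _ (by norm_num)
    rw [quickSortLoopB, quickSortHelperA]
    by_cases hlh : l < h
    · have h0l : 0 ≤ l := by
        rcases hc with h' | h' <;> omega
      simp only [hlh, if_true, ← pv_partition_eq arr l h h0l]
      have hq := pvLomuto_snd_bounds (pvPartitionA arr l h).2 l h hlh
      have hstep := pv_measure_step l h (pvLomuto (pvPartitionA arr l h).2 l h).2 rest hlh hq.1 hq.2
      have hsum2 := pv_measure_cons ((pvLomuto (pvPartitionA arr l h).2 l h).2 + 1) h rest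
      rw [ih g' l ((pvLomuto (pvPartitionA arr l h).2 l h).2 - 1)
            (pvLomuto (pvPartitionA arr l h).2 l h).1
            (((pvLomuto (pvPartitionA arr l h).2 l h).2 + 1, h) :: rest)
            (by omega) (by omega) (Or.inl h0l)]
      rw [ih (pvStackMeasure (((pvLomuto (pvPartitionA arr l h).2 l h).2 + 1, h) :: rest))
            ((pvLomuto (pvPartitionA arr l h).2 l h).2 + 1) h
            (quickSortHelperA f (pvLomuto (pvPartitionA arr l h).2 l h).1 l
              ((pvLomuto (pvPartitionA arr l h).2 l h).2 - 1)).2 rest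
            (by omega) (le_refl _) (Or.inl (by omega))]
      simp [List.append_assoc]
    · simp only [hlh, if_false]
      rw [pv_loop_fuel_congr g' (pvStackMeasure rest) rest arr (by omega) (le_refl _)]
      simp

-- the two wrappers agree for an effective high h under the precondition
theorem pv_core_eq (arr : List Int) (low h : Int)
    (hpre : low < h → 0 ≤ low ∧ h < (arr.length : Int)) :
    (quickSortHelperA ((h - low).toNat + 1) arr low h).1 ++
      [((quickSortHelperA ((h - low).toNat + 1) arr low h).2,
        List.replicate (quickSortHelperA ((h - low).toNat + 1) arr low h).2.length "green")]
    = (quickSortLoopB (pvStackMeasure [(low, h)]) [(low, h)] arr).1 ++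
      [((quickSortLoopB (pvStackMeasure [(low, h)]) [(low, h)] arr).2,
        List.replicate (quickSortLoopB (pvStackMeasure [(low, h)]) [(low, h)] arr).2.length "green")] := by
  by_cases hlh : low < h
  · obtain ⟨h0, -⟩ := hpre hlh
    rw [pv_bridge ((h - low).toNat + 1) (pvStackMeasure [(low, h)]) low h arr []
      (by omega) (le_refl _) (Or.inl h0)]
    simp [pvStackMeasure, quickSortLoopB]
  · obtain ⟨b, hb⟩ : ∃ b, pvStackMeasure [(low, h)] = b + 1 :=
      ⟨pvStackMeasure [(low, h)] - 1, by have := pv_measure_pos low h []; omega⟩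
    rw [hb, quickSortHelperA, quickSortLoopB]
    simp [hlh, pv_loop_nil]

-- ===== VERDICT (by name: the statement is the Claim_ definition above) =====
theorem quick_sort_generator_spec : Claim_equal_quick_sort_generator := by
  intro arr low high _dom hpre
  unfold Spec_quick_sort_generator
  unfold Pre_quick_sort_generator at hpre
  cases high with
  | none =>
    simp only [quick_sort_generator, quick_sort_generator_alt]
    exact pv_core_eq arr low ((arr.length : Int) - 1) hpre
  | some x =>
    simp only [quick_sort_generator, quick_sort_generator_alt]
    exact pv_core_eq arr low x hpre
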